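-- pv_equiv track=rewrite | github.com/Benhalor/fri | variable_byte_encoding.py | convert_integer_list_to_integer
-- ===== SOURCE A (Python) =====
-- def convert_integer_list_to_integer(integer_list):
--     n = len(integer_list) - 1
--     integer = 0
--     base = 128
--     for element in integer_list[:-1]:
--         integer += element * (base ** n)
--         n = n - 1
--     integer += (integer_list[-1] - 128) * (base ** n)  # the last integer was increased by 128 because of the coding
--     return integer
-- ===== SOURCE B (Python) =====
-- def convert_integer_list_to_integer(integer_list):
--     # Horner's method: one pass, no exponentiation.
--     integer = 0
--     for digit in integer_list:
--         integer = integer * 128 + digit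
--     return integer - 128
-- ===== Notes on version B (the rewrite author's own statement) =====
-- stated objective: faster
-- what changed: Replaces per-element exponentiation base**n with a single-pass Horner accumulation (acc = acc*128 + digit) followed by one subtraction of 128.
import Mathlib
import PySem

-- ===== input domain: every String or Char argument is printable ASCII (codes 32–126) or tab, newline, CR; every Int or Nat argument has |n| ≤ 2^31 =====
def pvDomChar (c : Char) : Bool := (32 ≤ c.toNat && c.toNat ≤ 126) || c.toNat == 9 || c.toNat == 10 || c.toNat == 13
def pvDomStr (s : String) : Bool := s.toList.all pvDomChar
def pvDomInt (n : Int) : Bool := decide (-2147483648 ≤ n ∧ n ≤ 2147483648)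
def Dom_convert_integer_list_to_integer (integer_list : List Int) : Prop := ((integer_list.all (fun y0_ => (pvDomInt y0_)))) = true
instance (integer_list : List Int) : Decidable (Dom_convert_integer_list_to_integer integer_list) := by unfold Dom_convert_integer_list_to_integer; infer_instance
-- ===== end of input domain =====

-- B replaces A's per-element exponentiation with a single-pass Horner accumulation (faster).

-- ===== PORT A =====
-- loop state: (integer, n); base ** n ported as 128 ^ n.toNat (exact: under Pre_ n stays ≥ 0)
def convert_integer_list_to_integer (integer_list : List Int) : Int :=
  let n : Int := (integer_list.length : Int) - 1
  let s := (PySem.List.slice integer_list none (some (-1))).foldl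
      (fun (s : Int × Int) e => (s.1 + e * 128 ^ s.2.toNat, s.2 - 1)) ((0 : Int), n)
  s.1 + (PySem.List.pyGetD integer_list (-1) 0 - 128) * 128 ^ s.2.toNat

-- ===== PORT B =====
def convert_integer_list_to_integer_alt (integer_list : List Int) : Int :=
  integer_list.foldl (fun acc d => acc * 128 + d) 0 - 128

-- ===== PRECONDITION & SPEC =====
-- A raises IndexError accessing the last element of the empty list; Pre_ excludes exactly that.
def Pre_convert_integer_list_to_integer (integer_list : List Int) : Prop := integer_list ≠ []
instance (integer_list : List Int) : Decidable (Pre_convert_integer_list_to_integer integer_list) := by unfold Pre_convert_integer_list_to_integer; infer_instance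
def pvWitness_convert_integer_list_to_integer : List Int := [129, 5]

def Spec_convert_integer_list_to_integer (integer_list : List Int) (out : Int) : Prop := out = convert_integer_list_to_integer_alt integer_list
instance (integer_list : List Int) (out : Int) : Decidable (Spec_convert_integer_list_to_integer integer_list out) := by unfold Spec_convert_integer_list_to_integer; infer_instance

-- ===== CLAIM =====
def Claim_equal_convert_integer_list_to_integer : Prop := ∀ (integer_list : List Int), Dom_convert_integer_list_to_integer integer_list → Pre_convert_integer_list_to_integer integer_list → Spec_convert_integer_list_to_integer integer_list (convert_integer_list_to_integer integer_list)

-- ===== LEMMAS AND PROOFS =====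

-- Horner's fold with an arbitrary accumulator.
theorem horner_acc (xs : List Int) (a : Int) :
    xs.foldl (fun acc d => acc * 128 + d) a
      = a * 128 ^ xs.length + xs.foldl (fun acc d => acc * 128 + d) 0 := by
  induction xs generalizing a with
  | nil => simp
  | cons e t ih =>
      simp only [List.foldl_cons, List.length_cons]
      rw [ih (a * 128 + e), ih (0 * 128 + e)]
      ring

-- A's loop, started at n = length of the remaining list, sums to 128 * Horner.
theorem afold (xs : List Int) (c : Int) :
    xs.foldl (fun (s : Int × Int) e => (s.1 + e * 128 ^ s.2.toNat, s.2 - 1))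
      (c, (xs.length : Int))
      = (c + 128 * xs.foldl (fun acc d => acc * 128 + d) 0, 0) := by
  induction xs generalizing c with
  | nil => simp
  | cons e t ih =>
      simp only [List.foldl_cons, List.length_cons]
      have h1 : ((t.length : Int) + 1 - 1) = (t.length : Int) := by ring
      have h2 : (((t.length : Int) + 1)).toNat = t.length + 1 := by omega
      rw [show ((t.length + 1 : Nat) : Int) = (t.length : Int) + 1 by push_cast; ring,
          h1, h2, ih]
      rw [horner_acc t (0 * 128 + e)]
      refine Prod.ext ?_ rfl
      simp only
      ring

theorem convert_eq (xs : List Int) (z : Int) :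
    convert_integer_list_to_integer (xs ++ [z])
      = convert_integer_list_to_integer_alt (xs ++ [z]) := by
  have hsl : PySem.List.slice (xs ++ [z]) none (some (-1)) = xs := by
    rw [PySem.List.slice_to_neg_one]; simp
  have hlast : PySem.List.pyGetD (xs ++ [z]) (-1) 0 = z :=
    PySem.List.pyGetD_neg_one_append_singleton xs z 0
  have hlen : (((xs ++ [z]).length : Int) - 1) = (xs.length : Int) := by
    simp
  simp only [convert_integer_list_to_integer, convert_integer_list_to_integer_alt,
    hsl, hlast, hlen, afold xs 0, List.foldl_append, List.foldl_cons, List.foldl_nil,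
    Int.toNat_zero, pow_zero]
  ring

-- ===== VERDICT =====
theorem convert_integer_list_to_integer_spec : Claim_equal_convert_integer_list_to_integer := by
  intro l _ hpre
  obtain ⟨xs, z, rfl⟩ : ∃ xs z, l = xs ++ [z] := by
    rcases List.eq_nil_or_concat l with h | ⟨xs, z, h⟩
    · exact absurd h hpre
    · exact ⟨xs, z, by simpa using h⟩
  exact (convert_eq xs z).symm ▸ rfl
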